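-- pv_equiv track=rewrite | github.com/RonaldReagan/PyssaultCube | PyACube/newmapper/structio.py | sizeOfStruct
-- ===== SOURCE A (Python) =====
-- TYPE_INT = 0 #implied len of 4
--
-- TYPE_INTLIST = 1
--
-- TYPE_UINT = 2
--
-- TYPE_UINTLIST = 3
--
-- TYPE_STR = 4 #Strips 'filler' off of the string. Defaults to '\x00'. Packs with filler.
--
-- TYPE_VSTR = 5 #Variable length string, takes the length provided by struct value named in 'size'.
--
-- TYPE_UCHAR = 6
--
-- TYPE_UCHARLIST = 7 #implied len of 1
--
-- TYPE_CHAR = 8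
--
-- TYPE_CHARLIST = 9
--
-- TYPE_SHORT = 10
--
-- TYPE_USHORT = 11
--
-- def sizeOfStruct(structformat):
-- 	total = 0
-- 	for item in structformat:
-- 		if item['type'] in [TYPE_INT,TYPE_UINT]:
-- 			total += 4
-- 		elif item['type'] in [TYPE_INTLIST,TYPE_UINTLIST]:
-- 			total += 4*item['len']
-- 		elif item['type'] == TYPE_STR:
-- 			total += item['len']
-- 		elif item['type'] == TYPE_VSTR:
-- 			total += item.get('maxlen',0) #If maxlen provided use this. Probably not the method when using structs with VSTR's
-- 		elif item['type'] in [TYPE_UCHAR,TYPE_CHAR]: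
-- 			total += 1
-- 		elif item['type'] in [TYPE_UCHARLIST,TYPE_CHARLIST]:
-- 			total += item['len']
-- 		elif item['type'] in [TYPE_SHORT,TYPE_USHORT]:
-- 			total += 2
--
-- 	return total
-- ===== SOURCE B (Python) =====
-- TYPE_INT = 0
-- TYPE_INTLIST = 1
-- TYPE_UINT = 2
-- TYPE_UINTLIST = 3
-- TYPE_STR = 4
-- TYPE_VSTR = 5
-- TYPE_UCHAR = 6
-- TYPE_UCHARLIST = 7
-- TYPE_CHAR = 8
-- TYPE_CHARLIST = 9
-- TYPE_SHORT = 10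
-- TYPE_USHORT = 11
--
-- def sizeOfStruct(structformat):
--     # staged aggregation: count the fixed-size types once, then sum each
--     # length-bearing family in its own pass and combine arithmetically
--     from collections import Counter
--     counts = Counter(item['type'] for item in structformat)
--     fixed = (4 * (counts[TYPE_INT] + counts[TYPE_UINT])
--              + 2 * (counts[TYPE_SHORT] + counts[TYPE_USHORT])
--              + (counts[TYPE_UCHAR] + counts[TYPE_CHAR]))
--     words = 4 * sum(i['len'] for i in structformat
--                     if i['type'] in (TYPE_INTLIST, TYPE_UINTLIST))
--     bytes_ = sum(i['len'] for i in structformat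
--                  if i['type'] in (TYPE_STR, TYPE_UCHARLIST, TYPE_CHARLIST))
--     vstr = sum(i.get('maxlen', 0) for i in structformat
--                if i['type'] == TYPE_VSTR)
--     return fixed + words + bytes_ + vstr
-- ===== Notes on version B (the rewrite author's own statement) =====
-- stated objective: alternative
-- what changed: Replaces A's single pass with an if/elif chain by staged aggregation: a Counter of type codes gives the fixed-size contribution in closed form, and three separate comprehension passes sum the lengths of the int-list, byte-list/str and vstr families, combined arithmetically.
import Mathlib
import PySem

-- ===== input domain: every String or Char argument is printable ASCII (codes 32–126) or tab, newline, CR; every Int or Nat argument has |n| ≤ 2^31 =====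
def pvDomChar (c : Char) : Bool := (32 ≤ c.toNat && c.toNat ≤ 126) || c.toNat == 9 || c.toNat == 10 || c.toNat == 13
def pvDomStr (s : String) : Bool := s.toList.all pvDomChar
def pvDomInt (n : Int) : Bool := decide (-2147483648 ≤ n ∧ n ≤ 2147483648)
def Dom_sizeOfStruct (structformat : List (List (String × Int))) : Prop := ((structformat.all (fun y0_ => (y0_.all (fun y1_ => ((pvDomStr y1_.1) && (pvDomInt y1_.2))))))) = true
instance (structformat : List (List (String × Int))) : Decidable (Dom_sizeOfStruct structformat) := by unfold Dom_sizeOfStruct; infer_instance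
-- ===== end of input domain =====

-- B replaces A's single-pass if/elif accumulation by staged aggregation: a count of the
-- fixed-size type codes combined in closed form, plus three separate passes summing the
-- lengths of each length-bearing family (objective: alternative; no speed claim).

-- ===== PORT A =====
-- item['type'] / item['len'] are bare subscripts in Python (KeyError when absent);
-- Pre_ below guarantees presence, so the total `getD 0` defaults are never reached on Pre_.
def sizeOfStruct (structformat : List (List (String × Int))) : Int :=
  structformat.foldl (fun total item =>
    let t := (item.lookup "type").getD 0
    if t = 0 ∨ t = 2 then total + 4
    else if t = 1 ∨ t = 3 then total + 4 * (item.lookup "len").getD 0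
    else if t = 4 then total + (item.lookup "len").getD 0
    else if t = 5 then total + (item.lookup "maxlen").getD 0
    else if t = 6 ∨ t = 8 then total + 1
    else if t = 7 ∨ t = 9 then total + (item.lookup "len").getD 0
    else if t = 10 ∨ t = 11 then total + 2
    else total) 0

-- ===== PORT B =====
-- Counter(item['type'] …)[k] is the multiplicity of k in the list of type codes
def sizeOfStruct_alt (structformat : List (List (String × Int))) : Int :=
  let ts := structformat.map (fun item => (item.lookup "type").getD 0)
  let fixed : Int := 4 * ((ts.count 0 : Int) + (ts.count 2 : Int))
                   + 2 * ((ts.count 10 : Int) + (ts.count 11 : Int))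
                   + ((ts.count 6 : Int) + (ts.count 8 : Int))
  let words : Int := 4 * ((structformat.filter (fun i =>
        let t := (i.lookup "type").getD 0; t == 1 || t == 3)).map
        (fun i => (i.lookup "len").getD 0)).sum
  let bytes_ : Int := ((structformat.filter (fun i =>
        let t := (i.lookup "type").getD 0; t == 4 || t == 7 || t == 9)).map
        (fun i => (i.lookup "len").getD 0)).sum
  let vstr : Int := ((structformat.filter (fun i =>
        (i.lookup "type").getD 0 == 5)).map
        (fun i => (i.lookup "maxlen").getD 0)).sum
  fixed + words + bytes_ + vstr

-- ===== PRECONDITION & SPEC =====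
-- Pre_ excludes exactly the inputs on which both Pythons raise KeyError: an item without a
-- 'type' key, or an item of a list/str type (1,3,4,7,9) without a 'len' key.
def Pre_sizeOfStruct (structformat : List (List (String × Int))) : Prop :=
  ∀ item ∈ structformat, (item.lookup "type").isSome = true ∧
    ((item.lookup "type").getD 0 ∈ ([1, 3, 4, 7, 9] : List Int) →
      (item.lookup "len").isSome = true)
instance (structformat : List (List (String × Int))) : Decidable (Pre_sizeOfStruct structformat) := by unfold Pre_sizeOfStruct; infer_instance

def pvWitness_sizeOfStruct : (List (List (String × Int))) :=
  [[("type", 0)], [("type", 9), ("len", 3)], [("type", 5)]]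

def Spec_sizeOfStruct (structformat : List (List (String × Int))) (out : Int) : Prop := out = sizeOfStruct_alt structformat
instance (structformat : List (List (String × Int))) (out : Int) : Decidable (Spec_sizeOfStruct structformat out) := by unfold Spec_sizeOfStruct; infer_instance

-- ===== CLAIM (what is proved, stated in full; the proofs are below) =====
def Claim_equal_sizeOfStruct : Prop := ∀ (structformat : List (List (String × Int))), Dom_sizeOfStruct structformat → Pre_sizeOfStruct structformat → Spec_sizeOfStruct structformat (sizeOfStruct structformat)

-- ===== LEMMAS AND PROOFS =====

-- the per-item contribution that A's branch chain adds
def pvContrib (item : List (String × Int)) : Int :=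
  let t := (item.lookup "type").getD 0
  if t = 0 ∨ t = 2 then 4
  else if t = 1 ∨ t = 3 then 4 * (item.lookup "len").getD 0
  else if t = 4 then (item.lookup "len").getD 0
  else if t = 5 then (item.lookup "maxlen").getD 0
  else if t = 6 ∨ t = 8 then 1
  else if t = 7 ∨ t = 9 then (item.lookup "len").getD 0
  else if t = 10 ∨ t = 11 then 2
  else 0

lemma pvA_eq (sf : List (List (String × Int))) (total : Int) :
    sf.foldl (fun total item =>
      let t := (item.lookup "type").getD 0
      if t = 0 ∨ t = 2 then total + 4
      else if t = 1 ∨ t = 3 then total + 4 * (item.lookup "len").getD 0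
      else if t = 4 then total + (item.lookup "len").getD 0
      else if t = 5 then total + (item.lookup "maxlen").getD 0
      else if t = 6 ∨ t = 8 then total + 1
      else if t = 7 ∨ t = 9 then total + (item.lookup "len").getD 0
      else if t = 10 ∨ t = 11 then total + 2
      else total) total
    = total + (sf.map pvContrib).sum := by
  induction sf generalizing total with
  | nil => simp
  | cons item rest ih =>
    simp only [List.foldl_cons, List.map_cons, List.sum_cons]
    rw [ih]
    simp only [pvContrib]
    split_ifs <;> ring

lemma pvB_cons (item : List (String × Int)) (rest : List (List (String × Int))) :
    sizeOfStruct_alt (item :: rest) = pvContrib item + sizeOfStruct_alt rest := by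
  simp only [sizeOfStruct_alt, pvContrib, List.map_cons, List.count_cons, List.filter_cons]
  set t := (item.lookup "type").getD 0 with ht
  by_cases h0 : t = 0
  · simp [h0]; ring
  · by_cases h2 : t = 2
    · simp [h2]; ring
    · by_cases h1 : t = 1
      · simp [h1]; ring
      · by_cases h3 : t = 3
        · simp [h3]; ring
        · by_cases h4 : t = 4
          · simp [h4]; ring
          · by_cases h5 : t = 5
            · simp [h5]; ring
            · by_cases h6 : t = 6
              · simp [h6]; ring
              · by_cases h8 : t = 8
                · simp [h8]; ring
                · by_cases h7 : t = 7
                  · simp [h7]; ring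
                  · by_cases h9 : t = 9
                    · simp [h9]; ring
                    · by_cases h10 : t = 10
                      · simp [h10]; ring
                      · by_cases h11 : t = 11
                        · simp [h11]; ring
                        · have e : ∀ k : Int, t ≠ k → (t == k) = false :=
                            fun k hk => beq_eq_false_iff_ne.mpr hk
                          simp [h0, h1, h2, h3, h4, h5, h6, h7, h8, h9, h10, h11,
                            e 0 h0, e 1 h1, e 2 h2, e 3 h3, e 4 h4, e 5 h5, e 6 h6,
                            e 7 h7, e 8 h8, e 9 h9, e 10 h10, e 11 h11]

lemma pvB_eq (sf : List (List (String × Int))) :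
    sizeOfStruct_alt sf = (sf.map pvContrib).sum := by
  induction sf with
  | nil => simp [sizeOfStruct_alt]
  | cons item rest ih => rw [pvB_cons, ih, List.map_cons, List.sum_cons]

-- ===== VERDICT (by name: the statement is the Claim_ definition above) =====
theorem sizeOfStruct_spec : Claim_equal_sizeOfStruct := by
  intro sf _ _
  show sizeOfStruct sf = sizeOfStruct_alt sf
  rw [pvB_eq]
  unfold sizeOfStruct
  rw [pvA_eq]; simp
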